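-- pv_equiv track=rewrite | github.com/sh4lk/OMNISCIENCE | omniscience/solvers/factorization.py | _integer_root
-- ===== SOURCE A (Python) =====
-- import math
--
-- def _integer_root(n: int, e: int) -> int | None:
--     """Compute the integer e-th root of n, or None if not a perfect power."""
--     if n < 0:
--         return None
--     if n == 0:
--         return 0
--     # Newton's method for integer root
--     if e == 1:
--         return n
--     if e == 2:
--         r = math.isqrt(n)
--         return r if r * r == n else None
--
--     # General case
--     lo, hi = 1, n
--     # Better initial guess
--     bits = n.bit_length()
--     hi = 1 << ((bits + e - 1) // e + 1)
--     lo = max(1, 1 << ((bits - 1) // e - 1))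
--
--     while lo <= hi:
--         mid = (lo + hi) // 2
--         power = mid ** e
--         if power == n:
--             return mid
--         elif power < n:
--             lo = mid + 1
--         else:
--             hi = mid - 1
--     return None
-- ===== SOURCE B (Python) =====
-- import math
--
-- def _integer_root(n: int, e: int) -> int | None:
--     """Compute the integer e-th root of n, or None if not a perfect power."""
--     if n < 0:
--         return None
--     if n == 0:
--         return 0
--     if e == 1:
--         return n
--     if e == 2:
--         r = math.isqrt(n)
--         return r if r * r == n else None
--     # Integer Newton iteration converging to floor(n ** (1/e))
--     x = 1 << (n.bit_length() // e + 1)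
--     while True:
--         y = ((e - 1) * x + n // x ** (e - 1)) // e
--         if y >= x:
--             break
--         x = y
--     return x if x ** e == n else None
-- ===== Notes on version B (the rewrite author's own statement) =====
-- stated objective: idiomatic
-- what changed: Replaces the bisection loop over [lo, hi] with the classic integer Newton fixed-point iteration x <- ((e-1)*x + n // x**(e-1)) // e started above the root (stop when y >= x), followed by a single x**e == n check.
import Mathlib
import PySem

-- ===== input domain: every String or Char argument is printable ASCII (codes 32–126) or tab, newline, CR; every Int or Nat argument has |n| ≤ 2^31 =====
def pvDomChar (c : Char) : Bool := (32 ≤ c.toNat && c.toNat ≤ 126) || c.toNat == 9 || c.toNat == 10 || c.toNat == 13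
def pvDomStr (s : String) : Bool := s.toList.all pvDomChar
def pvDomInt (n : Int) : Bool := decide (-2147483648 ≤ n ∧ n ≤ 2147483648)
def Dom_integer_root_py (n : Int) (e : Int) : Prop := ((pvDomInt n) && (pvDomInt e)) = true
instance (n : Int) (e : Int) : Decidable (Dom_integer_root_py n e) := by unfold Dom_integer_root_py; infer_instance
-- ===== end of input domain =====

-- B replaces A's bisection loop by the classic integer Newton iteration (same guards, same results);
-- Pre_ excludes exactly the inputs on which A raises (e <= 0 with n >= 1, or e >= 3 with n < 2^e: negative
-- shift count / ZeroDivisionError in A's initial-bound computation).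


-- ===== PORT A =====
-- mid ** e for Python ints; exact for e ≥ 0 (every use below happens under Pre_, where the exponent is ≥ 0)
def pvPow (b : Int) (k : Int) : Int := b ^ k.toNat

-- A's 'while lo <= hi' bisection loop, step for step
def pvBSearch (n : Int) (e : Int) (lo : Int) (hi : Int) : Option Int :=
  if h : lo ≤ hi then
    let mid := PySem.Int.floordiv (lo + hi) 2
    let power := pvPow mid e
    if power = n then some mid
    else if power < n then pvBSearch n e (mid + 1) hi
    else pvBSearch n e lo (mid - 1)
  else none
  termination_by (hi + 1 - lo).toNat
  decreasing_by
  · have := PySem.Int.floordiv_two_mid_bounds h; omega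
  · have := PySem.Int.floordiv_two_mid_bounds h; omega

def integer_root_py (n : Int) (e : Int) : Option Int :=
  if n < 0 then none
  else if n = 0 then some 0
  else if e = 1 then some n
  else if e = 2 then
    let r : Int := (Nat.sqrt n.toNat : Int)   -- math.isqrt(n), exact for n ≥ 0
    if r * r = n then some r else none
  else
    let bits : Int := (PySem.Int.bitLength n : Int)
    -- 1 << k; .toNat is exact because under Pre_ both shift counts are ≥ 0 (Python raises otherwise)
    let hi : Int := 2 ^ (PySem.Int.floordiv (bits + e - 1) e + 1).toNat
    let lo : Int := max 1 (2 ^ (PySem.Int.floordiv (bits - 1) e - 1).toNat)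
    pvBSearch n e lo hi

-- ===== PORT B =====
-- B's 'while True' Newton loop: y = ((e-1)*x + n // x**(e-1)) // e; stop when y >= x, else x = y.
-- The fuel only makes the loop total; on Pre_ inputs x decreases by ≥ 1 per step, so x₀ steps always suffice.
def pvNewtonLoop (n : Int) (e : Int) : Nat → Int → Int
  | 0, x => x
  | fuel + 1, x =>
    let y := PySem.Int.floordiv ((e - 1) * x + PySem.Int.floordiv n (pvPow x (e - 1))) e
    if x ≤ y then x else pvNewtonLoop n e fuel y

def integer_root_py_alt (n : Int) (e : Int) : Option Int :=
  if n < 0 then none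
  else if n = 0 then some 0
  else if e = 1 then some n
  else if e = 2 then
    let r : Int := (Nat.sqrt n.toNat : Int)   -- math.isqrt(n), exact for n ≥ 0
    if r * r = n then some r else none
  else
    let x0 : Int := 2 ^ (PySem.Int.floordiv (PySem.Int.bitLength n : Int) e + 1).toNat
    let x := pvNewtonLoop n e x0.toNat x0
    if pvPow x e = n then some x else none

-- ===== PRECONDITION & SPEC =====
-- Pre_ excludes exactly the inputs on which A raises: for n ≥ 1 it needs e ∈ {1, 2} or e ≥ 3 with
-- n ≥ 2^e (i.e. bit_length(n) ≥ e + 1); otherwise A's '1 << …' gets a negative count (ValueError)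
-- or '// e' divides by zero.  A returns a value on every input Pre_ admits.
def Pre_integer_root_py (n : Int) (e : Int) : Prop :=
  1 ≤ n → (e = 1 ∨ e = 2 ∨ (3 ≤ e ∧ e + 1 ≤ (PySem.Int.bitLength n : Int)))
instance (n : Int) (e : Int) : Decidable (Pre_integer_root_py n e) := by unfold Pre_integer_root_py; infer_instance
def pvWitness_integer_root_py : Int × Int := (64, 3)
def Spec_integer_root_py (n : Int) (e : Int) (out : Option Int) : Prop := out = integer_root_py_alt n e
instance (n : Int) (e : Int) (out : Option Int) : Decidable (Spec_integer_root_py n e out) := by unfold Spec_integer_root_py; infer_instance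

-- ===== CLAIM (what is proved, stated in full; the proofs are below) =====
def Claim_equal_integer_root_py : Prop := ∀ (n : Int) (e : Int), Dom_integer_root_py n e → Pre_integer_root_py n e → Spec_integer_root_py n e (integer_root_py n e)

-- ===== LEMMAS AND PROOFS =====

-- tangent-line inequality for t ↦ t^(k+1) (convexity), the heart of Newton's 'y ≥ root' step
theorem pv_tangent (k : Nat) : ∀ x r : Int, 0 ≤ x → 0 ≤ r →
    x ^ (k + 1) + (k + 1) * x ^ k * (r - x) ≤ r ^ (k + 1) := by
  induction k with
  | zero => intro x r _ _; norm_num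
  | succ k ih =>
    intro x r hx hr
    have h1 := ih x r hx hr
    have hsq : 0 ≤ ((k : Int) + 1) * x ^ k * (r - x) ^ 2 := by positivity
    have key : r * (x ^ (k + 1) + ((k : Int) + 1) * x ^ k * (r - x))
        - (x ^ (k + 2) + ((k : Int) + 2) * x ^ (k + 1) * (r - x))
        = ((k : Int) + 1) * x ^ k * (r - x) ^ 2 := by ring
    have h3 : r * (x ^ (k + 1) + ((k : Int) + 1) * x ^ k * (r - x)) ≤ r * r ^ (k + 1) :=
      mul_le_mul_of_nonneg_left h1 hr
    have h4 : r * r ^ (k + 1) = r ^ (k + 2) := by ring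
    push_cast
    linarith [hsq, key, h3, h4.le, h4.ge]

-- existence of the integer floor root
theorem pv_exists_floor_root (n : Int) (k : Nat) (hn : 1 ≤ n) (hk : 1 ≤ k) :
    ∃ r : Int, 1 ≤ r ∧ r ^ k ≤ n ∧ n < (r + 1) ^ k := by
  have hN : 1 ≤ n.toNat := by omega
  set P : Nat → Prop := fun m => m ^ k ≤ n.toNat with hP
  have hP1 : P 1 := by simp [hP]; omega
  set R : Nat := Nat.findGreatest P n.toNat with hR
  have hr1 : 1 ≤ R := Nat.le_findGreatest hN hP1
  have hspec : P R := Nat.findGreatest_spec (by omega) hP1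
  have hupper : n.toNat < (R + 1) ^ k := by
    by_cases hc : R + 1 ≤ n.toNat
    · have hng : ¬ P (R + 1) := Nat.findGreatest_is_greatest (by omega) hc
      exact Nat.lt_of_not_le hng
    · calc n.toNat < R + 1 := by omega
        _ ≤ (R + 1) ^ k := Nat.le_self_pow (by omega) _
  refine ⟨(R : Int), by exact_mod_cast hr1, ?_, ?_⟩
  · have : ((R ^ k : Nat) : Int) ≤ ((n.toNat : Nat) : Int) := by exact_mod_cast hspec
    push_cast at this; omega
  · have : ((n.toNat : Nat) : Int) < (((R + 1) ^ k : Nat) : Int) := by exact_mod_cast hupper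
    push_cast at this; omega

-- the Newton loop computes the floor root exactly
theorem pv_newton_eq (n e : Int) (he : 3 ≤ e) (r : Int) (hr1 : 1 ≤ r)
    (hrle : r ^ e.toNat ≤ n) (hlt : n < (r + 1) ^ e.toNat) :
    ∀ fuel : Nat, ∀ x : Int, r ≤ x → (x - r).toNat ≤ fuel → pvNewtonLoop n e fuel x = r := by
  have hkj : e.toNat = (e - 1).toNat + 1 := by omega
  set j : Nat := (e - 1).toNat with hjdef
  have hje : (j : Int) + 1 = e := by omega
  intro fuel
  induction fuel with
  | zero =>
    intro x hrx hfx
    have : x = r := by omega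
    simpa [pvNewtonLoop] using this
  | succ fuel ih =>
    intro x hrx hfx
    have hx1 : 1 ≤ x := le_trans hr1 hrx
    have hd : (0 : Int) < x ^ j := pow_pos (by omega) j
    have hF1 : r ≤ PySem.Int.floordiv ((e - 1) * x + PySem.Int.floordiv n (pvPow x (e - 1))) e := by
      have t := pv_tangent j x r (by omega) (by omega)
      have hrn : r ^ (j + 1) ≤ n := by rw [← hkj]; exact hrle
      have h5 : (e * r - (e - 1) * x) * x ^ j ≤ n := by
        have heq : (e * r - (e - 1) * x) * x ^ j
            = x ^ (j + 1) + ((j : Int) + 1) * x ^ j * (r - x) := by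
          rw [hje]; ring
        rw [heq]; exact le_trans t hrn
      have hfd : e * r - (e - 1) * x ≤ PySem.Int.floordiv n (pvPow x (e - 1)) := by
        have hpw : pvPow x (e - 1) = x ^ j := rfl
        rw [hpw, PySem.Int.le_floordiv_iff_mul_le hd]
        exact h5
      rw [PySem.Int.le_floordiv_iff_mul_le (by omega : (0:Int) < e)]
      nlinarith [hfd]
    by_cases hxy : x ≤ PySem.Int.floordiv ((e - 1) * x + PySem.Int.floordiv n (pvPow x (e - 1))) e
    · -- loop stops: x must already be the floor root
      have hxr : x = r := by
        by_contra hne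
        have hrltx : r < x := by omega
        have hnx : n < x * x ^ j := by
          have h6 : (r + 1) ^ (j + 1) ≤ x ^ (j + 1) :=
            pow_le_pow_left₀ (by omega) (by omega) _
          have : n < x ^ (j + 1) := lt_of_lt_of_le (by rw [← hkj]; exact hlt) h6
          rw [pow_succ] at this; linarith [this]
        have hfd2 : PySem.Int.floordiv n (pvPow x (e - 1)) < x := by
          have hpw : pvPow x (e - 1) = x ^ j := rfl
          rw [hpw, PySem.Int.floordiv_lt_iff_lt_mul hd]
          linarith [hnx]
        have : PySem.Int.floordiv ((e - 1) * x + PySem.Int.floordiv n (pvPow x (e - 1))) e < x := by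
          rw [PySem.Int.floordiv_lt_iff_lt_mul (by omega : (0:Int) < e)]
          nlinarith [hfd2]
        omega
      have hun : pvNewtonLoop n e (fuel + 1) x = x := by
        simp only [pvNewtonLoop]; rw [if_pos hxy]
      rw [hun]; exact hxr
    · -- loop continues with y < x
      have hstep : pvNewtonLoop n e (fuel + 1) x
          = pvNewtonLoop n e fuel (PySem.Int.floordiv ((e - 1) * x + PySem.Int.floordiv n (pvPow x (e - 1))) e) := by
        simp only [pvNewtonLoop]; rw [if_neg hxy]
      rw [hstep]
      exact ih _ hF1 (by omega)

-- one unfolding step of the bisection loop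
theorem pvBSearch_step (n e lo hi : Int) (h : lo ≤ hi) :
    pvBSearch n e lo hi =
      (if pvPow (PySem.Int.floordiv (lo + hi) 2) e = n then some (PySem.Int.floordiv (lo + hi) 2)
       else if pvPow (PySem.Int.floordiv (lo + hi) 2) e < n then
         pvBSearch n e (PySem.Int.floordiv (lo + hi) 2 + 1) hi
       else pvBSearch n e lo (PySem.Int.floordiv (lo + hi) 2 - 1)) := by
  rw [pvBSearch]; simp [h]

theorem pvBSearch_stop (n e lo hi : Int) (h : ¬ lo ≤ hi) : pvBSearch n e lo hi = none := by
  rw [pvBSearch]; simp [h]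

-- the bisection finds the root when it lies in the window
theorem pv_bsearch_some (n e : Int) (he : 3 ≤ e) (m : Int) (h1m : 1 ≤ m) (hm : m ^ e.toNat = n) :
    ∀ lo hi : Int, 1 ≤ lo → lo ≤ m → m ≤ hi → pvBSearch n e lo hi = some m := by
  have hk : e.toNat ≠ 0 := by omega
  have main : ∀ N : Nat, ∀ lo hi : Int, (hi + 1 - lo).toNat ≤ N → 1 ≤ lo → lo ≤ m → m ≤ hi →
      pvBSearch n e lo hi = some m := by
    intro N
    induction N with
    | zero => intro lo hi hN h1 h2 h3; omega
    | succ N ih =>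
      intro lo hi hN h1 h2 h3
      have hle : lo ≤ hi := le_trans h2 h3
      have mb := PySem.Int.floordiv_two_mid_bounds hle
      rw [pvBSearch_step n e lo hi hle]
      set mid := PySem.Int.floordiv (lo + hi) 2 with hmid
      have hpw : pvPow mid e = mid ^ e.toNat := rfl
      by_cases hq : pvPow mid e = n
      · have hmm : mid = m := by
          rcases lt_trichotomy mid m with hlt | heq | hgt
          · exfalso
            have := pow_lt_pow_left₀ hlt (by omega : (0:Int) ≤ mid) hk
            rw [hpw] at hq; omega
          · exact heq
          · exfalso
            have := pow_lt_pow_left₀ hgt (by omega : (0:Int) ≤ m) hk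
            rw [hpw] at hq; omega
        rw [if_pos hq, hmm]
      · rw [if_neg hq]
        by_cases hq2 : pvPow mid e < n
        · rw [if_pos hq2]
          have hmidm : mid < m := by
            by_contra hc
            have := pow_le_pow_left₀ (by omega : (0:Int) ≤ m) (by omega : m ≤ mid) e.toNat
            rw [hpw] at hq2; omega
          exact ih (mid + 1) hi (by omega) (by omega) (by omega) h3
        · rw [if_neg hq2]
          have hmidm : m < mid := by
            by_contra hc
            have := pow_le_pow_left₀ (by omega : (0:Int) ≤ mid) (by omega : mid ≤ m) e.toNat
            rw [hpw] at hq; rw [hpw] at hq2; omega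
          exact ih lo (mid - 1) (by omega) h1 h2 (by omega)
  intro lo hi h1 h2 h3
  exact main (hi + 1 - lo).toNat lo hi le_rfl h1 h2 h3

-- the bisection returns none when no e-th root lies in the window
theorem pv_bsearch_none (n e : Int) :
    ∀ lo hi : Int, (∀ m : Int, lo ≤ m → m ≤ hi → m ^ e.toNat ≠ n) → pvBSearch n e lo hi = none := by
  have main : ∀ N : Nat, ∀ lo hi : Int, (hi + 1 - lo).toNat ≤ N →
      (∀ m : Int, lo ≤ m → m ≤ hi → m ^ e.toNat ≠ n) → pvBSearch n e lo hi = none := by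
    intro N
    induction N with
    | zero =>
      intro lo hi hN h
      exact pvBSearch_stop n e lo hi (by omega)
    | succ N ih =>
      intro lo hi hN h
      by_cases hle : lo ≤ hi
      · have mb := PySem.Int.floordiv_two_mid_bounds hle
        rw [pvBSearch_step n e lo hi hle]
        set mid := PySem.Int.floordiv (lo + hi) 2 with hmid
        have hpw : pvPow mid e = mid ^ e.toNat := rfl
        have hq : ¬ pvPow mid e = n := by rw [hpw]; exact h mid (by omega) (by omega)
        rw [if_neg hq]
        by_cases hq2 : pvPow mid e < n
        · rw [if_pos hq2]
          exact ih (mid + 1) hi (by omega) (fun m' a b => h m' (by omega) b)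
        · rw [if_neg hq2]
          exact ih lo (mid - 1) (by omega) (fun m' a b => h m' a (by omega))
      · exact pvBSearch_stop n e lo hi hle
  intro lo hi h
  exact main (hi + 1 - lo).toNat lo hi le_rfl h

-- the whole general case (n ≥ 1, e ≥ 3, 2^e ≤ n): both ports compute `if r^e = n then some r else none`
theorem pv_general (n e : Int) (hn1 : 1 ≤ n) (he : 3 ≤ e)
    (hbl : e + 1 ≤ (PySem.Int.bitLength n : Int)) :
    integer_root_py n e = integer_root_py_alt n e := by
  obtain ⟨B, hB⟩ : ∃ B : Nat, B = PySem.Int.bitLength n := ⟨_, rfl⟩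
  obtain ⟨k, hk⟩ : ∃ k : Nat, k = e.toNat := ⟨_, rfl⟩
  have hek : (k : Int) = e := by omega
  have hk3 : 3 ≤ k := by omega
  have hBe : e + 1 ≤ (B : Int) := by omega
  obtain ⟨r, hr1, hrle, hrlt⟩ := pv_exists_floor_root n k hn1 (by omega)
  -- bit-length bracket 2^(B-1) ≤ n < 2^B
  have hnlt : n < (2 : Int) ^ B := by
    have h := PySem.Int.lt_two_pow_bitLength n
    rw [← hB] at h
    have h2 : n.toNat < 2 ^ B := by omega
    have h3 : ((n.toNat : Nat) : Int) < ((2 ^ B : Nat) : Int) := by exact_mod_cast h2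
    push_cast at h3; omega
  have hnge : (2 : Int) ^ (B - 1) ≤ n := by
    have h := PySem.Int.two_pow_bitLength_le n (by omega)
    rw [← hB] at h
    have h2 : 2 ^ (B - 1) ≤ n.toNat := by omega
    have h3 : ((2 ^ (B - 1) : Nat) : Int) ≤ ((n.toNat : Nat) : Int) := by exact_mod_cast h2
    push_cast at h3; omega
  -- the three quotients
  obtain ⟨q0, hq0⟩ : ∃ q : Int, q = PySem.Int.floordiv (B : Int) e := ⟨_, rfl⟩
  obtain ⟨q2, hq2⟩ : ∃ q : Int, q = PySem.Int.floordiv ((B : Int) + e - 1) e := ⟨_, rfl⟩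
  obtain ⟨q1, hq1⟩ : ∃ q : Int, q = PySem.Int.floordiv ((B : Int) - 1) e := ⟨_, rfl⟩
  have hq0b : q0 * e ≤ (B : Int) ∧ (B : Int) < q0 * e + e := by
    have h1 := PySem.Int.floordiv_mul_add_mod (B : Int) e
    have h2 := PySem.Int.mod_nonneg (B : Int) (by omega : (0:Int) < e)
    have h3 := PySem.Int.mod_lt (B : Int) (by omega : (0:Int) < e)
    rw [← hq0] at h1
    constructor <;> omega
  have hq01 : 1 ≤ q0 := by
    rw [hq0, PySem.Int.le_floordiv_iff_mul_le (by omega : (0:Int) < e)]; omega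
  have hq1b : q1 * e ≤ (B : Int) - 1 := by
    have h1 := PySem.Int.floordiv_mul_add_mod ((B : Int) - 1) e
    have h2 := PySem.Int.mod_nonneg ((B : Int) - 1) (by omega : (0:Int) < e)
    rw [← hq1] at h1
    omega
  have hq11 : 1 ≤ q1 := by
    rw [hq1, PySem.Int.le_floordiv_iff_mul_le (by omega : (0:Int) < e)]; omega
  have hq02 : q0 ≤ q2 := by
    rw [hq2, PySem.Int.le_floordiv_iff_mul_le (by omega : (0:Int) < e)]
    have := hq0b.1; omega
  -- the three powers of two
  obtain ⟨x0, hx0⟩ : ∃ x : Int, x = 2 ^ (q0 + 1).toNat := ⟨_, rfl⟩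
  obtain ⟨hi0, hhi0⟩ : ∃ x : Int, x = 2 ^ (q2 + 1).toNat := ⟨_, rfl⟩
  obtain ⟨L, hL⟩ : ∃ x : Int, x = 2 ^ (q1 - 1).toNat := ⟨_, rfl⟩
  have hx01 : 1 ≤ x0 := by rw [hx0]; exact one_le_pow₀ (by norm_num)
  -- r < x0 ≤ hi0
  have hrx0 : r < x0 := by
    by_contra hc
    have h1 : x0 ^ k ≤ r ^ k := pow_le_pow_left₀ (by omega : (0:Int) ≤ x0) (by omega) k
    have hc2 : (((q0 + 1).toNat * k : Nat) : Int) = (q0 + 1) * e := by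
      push_cast [Int.toNat_of_nonneg (show (0:Int) ≤ q0 + 1 by omega)]; rw [hek]
    have hprod : (q0 + 1) * e = q0 * e + e := by ring
    have h2 : B ≤ (q0 + 1).toNat * k := by
      have := hq0b.2; omega
    have h3 : (2 : Int) ^ B ≤ (2 : Int) ^ ((q0 + 1).toNat * k) :=
      pow_le_pow_right₀ one_le_two h2
    have h4 : x0 ^ k = (2 : Int) ^ ((q0 + 1).toNat * k) := by rw [hx0, ← pow_mul]
    omega
  have hx0hi : x0 ≤ hi0 := by
    rw [hx0, hhi0]; exact pow_le_pow_right₀ one_le_two (by omega)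
  -- if m^k = n and 1 ≤ m then m = r (strict monotonicity of the k-th power)
  have huniq : ∀ m : Int, 1 ≤ m → m ^ k = n → m = r := by
    intro m h1m hmk
    by_contra hne
    rcases lt_or_gt_of_ne hne with hlt | hgt
    · have h5 : m + 1 ≤ r := by omega
      have h6 := pow_le_pow_left₀ (by omega : (0:Int) ≤ m + 1) h5 k
      have h7 := pow_lt_pow_left₀ (show m < m + 1 by omega) (by omega : (0:Int) ≤ m) (by omega : k ≠ 0)
      omega
    · have h5 : r + 1 ≤ m := by omega
      have h6 := pow_le_pow_left₀ (by omega : (0:Int) ≤ r + 1) h5 k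
      omega
  -- in the perfect-power case, r lies above L (the lower window bound)
  have hLr : r ^ k = n → L ≤ r := by
    intro hroot
    by_contra hc
    have h1 : r ^ k < L ^ k := by
      rw [hL]; rw [hL] at hc
      exact pow_lt_pow_left₀ (by omega) (by omega) (by omega)
    have h2 : L ^ k = (2 : Int) ^ ((q1 - 1).toNat * k) := by rw [hL, ← pow_mul]
    have hc2 : (((q1 - 1).toNat * k : Nat) : Int) = (q1 - 1) * e := by
      push_cast [Int.toNat_of_nonneg (show (0:Int) ≤ q1 - 1 by omega)]; rw [hek]
    have hprod : (q1 - 1) * e = q1 * e - e := by ring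
    have h3 : (q1 - 1).toNat * k ≤ B - 1 := by omega
    have h4 : (2 : Int) ^ ((q1 - 1).toNat * k) ≤ (2 : Int) ^ (B - 1) :=
      pow_le_pow_right₀ one_le_two h3
    omega
  -- unfold both ports in the general branch
  have hA : integer_root_py n e = pvBSearch n e (max 1 L) hi0 := by
    rw [integer_root_py]
    rw [if_neg (by omega : ¬ n < 0), if_neg (by omega : ¬ n = 0),
        if_neg (by omega : ¬ e = 1), if_neg (by omega : ¬ e = 2)]
    show pvBSearch n e
        (max 1 (2 ^ (PySem.Int.floordiv ((PySem.Int.bitLength n : Int) - 1) e - 1).toNat))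
        (2 ^ (PySem.Int.floordiv ((PySem.Int.bitLength n : Int) + e - 1) e + 1).toNat)
      = pvBSearch n e (max 1 L) hi0
    rw [← hB, ← hq2, ← hq1, ← hhi0, ← hL]
  have hBp : integer_root_py_alt n e
      = (if pvPow (pvNewtonLoop n e x0.toNat x0) e = n then some (pvNewtonLoop n e x0.toNat x0)
         else none) := by
    rw [integer_root_py_alt]
    rw [if_neg (by omega : ¬ n < 0), if_neg (by omega : ¬ n = 0),
        if_neg (by omega : ¬ e = 1), if_neg (by omega : ¬ e = 2)]
    show (if pvPow (pvNewtonLoop n e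
            ((2 : Int) ^ (PySem.Int.floordiv ((PySem.Int.bitLength n : Int)) e + 1).toNat).toNat
            ((2 : Int) ^ (PySem.Int.floordiv ((PySem.Int.bitLength n : Int)) e + 1).toNat)) e = n
          then some (pvNewtonLoop n e
            ((2 : Int) ^ (PySem.Int.floordiv ((PySem.Int.bitLength n : Int)) e + 1).toNat).toNat
            ((2 : Int) ^ (PySem.Int.floordiv ((PySem.Int.bitLength n : Int)) e + 1).toNat))
          else none)
      = (if pvPow (pvNewtonLoop n e x0.toNat x0) e = n then some (pvNewtonLoop n e x0.toNat x0)
         else none)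
    rw [← hB, ← hq0, ← hx0]
  have hnewton : pvNewtonLoop n e x0.toNat x0 = r := by
    refine pv_newton_eq n e he r hr1 (hk ▸ hrle) (hk ▸ hrlt)
      x0.toNat x0 (by omega) (by omega)
  have hpwr : pvPow r e = r ^ k := by rw [pvPow, hk]
  rw [hA, hBp, hnewton, hpwr]
  by_cases hroot : r ^ k = n
  · rw [if_pos hroot]
    refine pv_bsearch_some n e he r hr1 (hk ▸ hroot) (max 1 L) hi0
      (le_max_left 1 L) (max_le hr1 (hLr hroot)) (by omega)
  · rw [if_neg hroot]
    refine pv_bsearch_none n e (max 1 L) hi0 ?_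
    intro m hmlo hmhi hmk
    rw [← hk] at hmk
    have h1m : 1 ≤ m := le_trans (le_max_left 1 L) hmlo
    exact hroot (by rw [← huniq m h1m hmk]; exact hmk)

-- ===== VERDICT (by name: the statement is the Claim_ definition above) =====
theorem integer_root_py_spec : Claim_equal_integer_root_py := by
  intro n e _hdom hpre
  unfold Spec_integer_root_py
  by_cases h1 : n < 0
  · simp [integer_root_py, integer_root_py_alt, h1]
  · by_cases h2 : n = 0
    · simp [integer_root_py, integer_root_py_alt, h2]
    · by_cases h3 : e = 1
      · simp [integer_root_py, integer_root_py_alt, h1, h2, h3]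
      · by_cases h4 : e = 2
        · simp [integer_root_py, integer_root_py_alt, h1, h2, h4]
        · have hn1 : 1 ≤ n := by omega
          rcases hpre hn1 with h | h | ⟨he, hbl⟩
          · exact absurd h h3
          · exact absurd h h4
          · exact pv_general n e hn1 he hbl
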